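-- pv_equiv track=rewrite | github.com/Ra1nyLuv/pythonProjects_Curriculum | AlgorithmProjects/experiment2_3.py | dynamic_programming_compression
-- ===== SOURCE A (Python) =====
-- def dynamic_programming_compression(l, b):
--     """ 动态规划计算最优压缩方案 """
--     n = len(l)
--     s = [0] * (n + 1)
--     kay = [0] * (n + 1)
--
--     def lsum(a, b_index):
--         return sum(l[a:b_index+1])
--
--     def bmax(a, b_index):
--         return max(b[a:b_index+1])
--
--     for i in range(1, n + 1):
--         s[i] = s[i-1] + l[i-1] * b[i-1] + 11
--         kay[i] = 1
--         for k in range(2, min(i + 1, 257)):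
--             if i - k >= 0:
--                 new_s = s[i-k] + lsum(i-k, i-1) * bmax(i-k, i-1) + 11
--                 if new_s < s[i]:
--                     s[i] = new_s
--                     kay[i] = k
--     return s, kay
-- ===== SOURCE B (Python) =====
-- def dynamic_programming_compression(l, b):
--     """DP optimal compression: O(n*K) via running segment sum and max instead of rescanning slices."""
--     n = len(l)
--     s = [0] * (n + 1)
--     kay = [0] * (n + 1)
--     for i in range(1, n + 1):
--         seg_sum = 0
--         seg_max = b[i - 1]
--         best = None
--         best_k = 0
--         for k in range(1, min(i, 256) + 1):
--             seg_sum += l[i - k]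
--             if b[i - k] > seg_max:
--                 seg_max = b[i - k]
--             cand = s[i - k] + seg_sum * seg_max + 11
--             if best is None or cand < best:
--                 best = cand
--                 best_k = k
--         s[i] = best
--         kay[i] = best_k
--     return s, kay
-- ===== Notes on version B (the rewrite author's own statement) =====
-- stated objective: faster
-- what changed: Instead of recomputing sum(l[i-k:i]) and max(b[i-k:i]) from scratch for every k (a slice scan inside the k-loop), B extends a running segment sum and running max by one element as k grows, removing the inner rescans.
import Mathlib
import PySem

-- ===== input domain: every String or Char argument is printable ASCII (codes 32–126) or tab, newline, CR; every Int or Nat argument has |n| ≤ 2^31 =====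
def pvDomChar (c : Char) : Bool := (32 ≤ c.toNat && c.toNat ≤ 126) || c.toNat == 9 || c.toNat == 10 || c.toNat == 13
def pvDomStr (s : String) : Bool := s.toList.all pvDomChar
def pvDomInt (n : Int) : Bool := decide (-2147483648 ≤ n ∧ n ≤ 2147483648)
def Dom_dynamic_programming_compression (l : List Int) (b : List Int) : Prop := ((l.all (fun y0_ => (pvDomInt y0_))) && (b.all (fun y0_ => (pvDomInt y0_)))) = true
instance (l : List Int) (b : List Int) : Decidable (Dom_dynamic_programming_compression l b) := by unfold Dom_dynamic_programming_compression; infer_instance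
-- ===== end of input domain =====

-- B replaces A's per-k slice-sum and slice-max rescans by a running segment sum and
-- running max extended leftwards as k grows: O(n·K) instead of O(n·K²), K = 256.

-- ===== PORT A =====
-- Python A's nested helper lsum(a, b_index) = sum(l[a:b_index+1])
def pvLsum (l : List Int) (a bi : Nat) : Int :=
  (PySem.List.slice l (some (a : Int)) (some ((bi : Int) + 1))).sum

-- Python A's nested helper bmax(a, b_index) = max(b[a:b_index+1]); Python max raises on an
-- empty slice — under Pre_ the slice is never empty, so the .getD 0 default never fires.
def pvBmax (b : List Int) (a bi : Nat) : Int :=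
  (PySem.List.max? (PySem.List.slice b (some (a : Int)) (some ((bi : Int) + 1))) (fun y => y)).getD 0

-- A's inner k-loop: state (s[i], kay[i]), k = 2 .. min(i+1,257)-1, rescanning slices each k
def aInner (l b s : List Int) (i : Nat) : Int × Int :=
  (List.range' 2 (min (i+1) 257 - 2)).foldl
    (fun (p : Int × Int) (k : Nat) =>
      if (i : Int) - (k : Int) ≥ 0 then
        let new_s := s.getD (i-k) 0 + pvLsum l (i-k) (i-1) * pvBmax b (i-k) (i-1) + 11
        if new_s < p.1 then (new_s, (k : Int)) else p
      else p)
    (s.getD (i-1) 0 + l.getD (i-1) 0 * b.getD (i-1) 0 + 11, 1)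

def dynamic_programming_compression (l : List Int) (b : List Int) : List Int × List Int :=
  (List.range' 1 l.length).foldl
    (fun (st : List Int × List Int) i =>
      let r := aInner l b st.1 i
      (st.1.set i r.1, st.2.set i r.2))
    (List.replicate (l.length+1) 0, List.replicate (l.length+1) 0)

-- ===== PORT B =====
-- B's inner k-loop: state (seg_sum, seg_max, best, best_k), k = 1 .. min(i,256),
-- the segment sum/max extended by one element per step instead of rescanned.
def bInner (l b s : List Int) (i : Nat) : Int × Int × Option Int × Int :=
  (List.range' 1 (min i 256)).foldl
    (fun (q : Int × Int × Option Int × Int) (k : Nat) =>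
      let seg_sum := q.1 + l.getD (i-k) 0
      let seg_max := if b.getD (i-k) 0 > q.2.1 then b.getD (i-k) 0 else q.2.1
      let cand := s.getD (i-k) 0 + seg_sum * seg_max + 11
      match q.2.2.1 with
      | none => (seg_sum, seg_max, some cand, (k : Int))
      | some bv =>
          if cand < bv then (seg_sum, seg_max, some cand, (k : Int))
          else (seg_sum, seg_max, some bv, q.2.2.2))
    (0, b.getD (i-1) 0, none, 0)

def dynamic_programming_compression_alt (l : List Int) (b : List Int) : List Int × List Int :=
  (List.range' 1 l.length).foldl
    (fun (st : List Int × List Int) i =>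
      let r := bInner l b st.1 i
      (st.1.set i (r.2.2.1.getD 0), st.2.set i r.2.2.2))
    (List.replicate (l.length+1) 0, List.replicate (l.length+1) 0)

-- ===== PRECONDITION & SPEC =====
-- Pre_ excludes exactly the inputs where Python A raises: if len(b) < len(l) the loop hits
-- b[i-1] out of range (IndexError) or max() of an empty slice (ValueError).
def Pre_dynamic_programming_compression (l : List Int) (b : List Int) : Prop :=
  l.length ≤ b.length
instance (l : List Int) (b : List Int) : Decidable (Pre_dynamic_programming_compression l b) := by
  unfold Pre_dynamic_programming_compression; infer_instance

def pvWitness_dynamic_programming_compression : List Int × List Int := ([2, 3, 1], [4, 5, 2])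

def Spec_dynamic_programming_compression (l : List Int) (b : List Int) (out : List Int × List Int) : Prop := out = dynamic_programming_compression_alt l b
instance (l : List Int) (b : List Int) (out : List Int × List Int) : Decidable (Spec_dynamic_programming_compression l b out) := by unfold Spec_dynamic_programming_compression; infer_instance

-- ===== CLAIM (what is proved, stated in full; the proofs are below) =====
def Claim_equal_dynamic_programming_compression : Prop := ∀ (l : List Int) (b : List Int), Dom_dynamic_programming_compression l b → Pre_dynamic_programming_compression l b → Spec_dynamic_programming_compression l b (dynamic_programming_compression l b)

-- ===== LEMMAS AND PROOFS =====

-- sum of l[i-k : i], defined by extending the segment one element to the left per step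
def segS (l : List Int) (i : Nat) : Nat → Int
  | 0 => 0
  | k+1 => l.getD (i-(k+1)) 0 + segS l i k

-- max of b[i-k : i], same recursion (seeded with b[i-1], the k = 1 element)
def segM (b : List Int) (i : Nat) : Nat → Int
  | 0 => b.getD (i-1) 0
  | k+1 => max (b.getD (i-(k+1)) 0) (segM b i k)

-- cost of ending with a block of length k at position i, reading s for the prefix
def candF (l b s : List Int) (i k : Nat) : Int :=
  s.getD (i-k) 0 + segS l i k * segM b i k + 11

-- running best (value, k) over k = 1 .. m+1, strict improvement, smallest k on ties
def bst (l b s : List Int) (i : Nat) : Nat → Int × Int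
  | 0 => (candF l b s i 1, 1)
  | m+1 => if candF l b s i (m+2) < (bst l b s i m).1
           then (candF l b s i (m+2), (m : Int)+2) else bst l b s i m

theorem foldl_max_swap (t : List Int) : ∀ x a : Int,
    t.foldl max (max x a) = max a (t.foldl max x) := by
  induction t with
  | nil => intro x a; simp [max_comm]
  | cons c t ih =>
      intro x a
      simp only [List.foldl_cons]
      rw [max_right_comm x a c, ih (max x c) a]

theorem seg_cons (xs : List Int) (i k : Nat) (hk : k + 1 ≤ i) (hi : i ≤ xs.length) :
    (xs.drop (i-(k+1))).take (k+1) = xs.getD (i-(k+1)) 0 :: (xs.drop (i-k)).take k := by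
  have hlt : i-(k+1) < xs.length := by omega
  rw [List.drop_eq_getElem_cons hlt, List.take_succ_cons]
  rw [List.getD_eq_getElem?_getD, List.getElem?_eq_getElem hlt]
  have : i-(k+1)+1 = i-k := by omega
  rw [this]
  rfl

theorem sum_take_drop (l : List Int) (i : Nat) :
    ∀ k, k ≤ i → i ≤ l.length → ((l.drop (i-k)).take k).sum = segS l i k := by
  intro k
  induction k with
  | zero => intro _ _; simp [segS]
  | succ k ih =>
      intro hk hi
      rw [seg_cons l i k hk hi, List.sum_cons, ih (by omega) hi]
      rfl

theorem max?_take_drop (b : List Int) (i : Nat) :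
    ∀ k, 1 ≤ k → k ≤ i → i ≤ b.length →
      PySem.List.max? ((b.drop (i-k)).take k) (fun y => y) = some (segM b i k) := by
  intro k
  induction k with
  | zero => omega
  | succ k ih =>
      intro _ hk hi
      rw [seg_cons b i k hk hi]
      rcases Nat.eq_zero_or_pos k with h0 | hpos
      · subst h0
        simp [PySem.List.max?_id_cons, segM]
      · have ihk := ih hpos (by omega) hi
        have hT : (b.drop (i-k)).take k
            = b.getD (i-k) 0 :: (b.drop (i-(k-1))).take (k-1) := by
          have h := seg_cons b i (k-1) (by omega) hi
          rwa [show k-1+1 = k by omega] at h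
        rw [hT, PySem.List.max?_id_cons] at ihk
        have hseg : segM b i k
            = ((b.drop (i-(k-1))).take (k-1)).foldl max (b.getD (i-k) 0) :=
          (Option.some.inj ihk).symm
        rw [hT, PySem.List.max?_id_cons]
        simp only [List.foldl_cons]
        rw [max_comm (b.getD (i-(k+1)) 0) (b.getD (i-k) 0),
            foldl_max_swap _ (b.getD (i-k) 0) (b.getD (i-(k+1)) 0), ← hseg]
        rfl

theorem lsum_eq (l : List Int) (i k : Nat) (h1 : 1 ≤ k) (hk : k ≤ i) (hi : i ≤ l.length) :
    pvLsum l (i-k) (i-1) = segS l i k := by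
  unfold pvLsum
  have hcast : ((i-1 : Nat) : Int) + 1 = ((i : Nat) : Int) := by omega
  rw [hcast, PySem.List.slice_natCast]
  rw [show i - (i-k) = k by omega]
  exact sum_take_drop l i k hk hi

theorem bmax_eq (b : List Int) (i k : Nat) (h1 : 1 ≤ k) (hk : k ≤ i) (hi : i ≤ b.length) :
    pvBmax b (i-k) (i-1) = segM b i k := by
  unfold pvBmax
  have hcast : ((i-1 : Nat) : Int) + 1 = ((i : Nat) : Int) := by omega
  rw [hcast, PySem.List.slice_natCast]
  rw [show i - (i-k) = k by omega]
  rw [max?_take_drop b i k h1 hk hi]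
  rfl

theorem candF_one (l b s : List Int) (i : Nat) :
    candF l b s i 1 = s.getD (i-1) 0 + l.getD (i-1) 0 * b.getD (i-1) 0 + 11 := by
  simp [candF, segS, segM]

theorem aInner_eq (l b s : List Int) (i : Nat) (hi : 1 ≤ i)
    (hl : i ≤ l.length) (hb : i ≤ b.length) :
    aInner l b s i = bst l b s i (min i 256 - 1) := by
  unfold aInner
  rw [show min (i+1) 257 - 2 = min i 256 - 1 by omega]
  rw [← candF_one]
  have key : ∀ m, m + 1 ≤ min i 256 →
      (List.range' 2 m).foldl
        (fun (p : Int × Int) (k : Nat) =>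
          if (i : Int) - (k : Int) ≥ 0 then
            let new_s := s.getD (i-k) 0 + pvLsum l (i-k) (i-1) * pvBmax b (i-k) (i-1) + 11
            if new_s < p.1 then (new_s, (k : Int)) else p
          else p)
        (candF l b s i 1, 1) = bst l b s i m := by
    intro m
    induction m with
    | zero => intro _; simp [bst]
    | succ m ih =>
        intro hm
        rw [List.range'_concat, List.foldl_append, ih (by omega)]
        simp only [one_mul]
        have hk2 : 2 + m ≤ i := by omega
        simp only [List.foldl_cons, List.foldl_nil]
        have hge : ((i : Int) - ((2 + m : Nat) : Int) ≥ 0) := by omega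
        rw [if_pos hge]
        rw [show i - (2+m) = i - (m+2) by omega,
            lsum_eq l i (m+2) (by omega) (by omega) hl,
            bmax_eq b i (m+2) (by omega) (by omega) hb]
        show (if candF l b s i (m+2) < (bst l b s i m).1
              then (candF l b s i (m+2), ((2+m : Nat) : Int)) else bst l b s i m) = _
        rw [show (((2+m : Nat)) : Int) = (m : Int) + 2 by omega]
        rfl
  exact key (min i 256 - 1) (by omega)

theorem bInner_eq (l b s : List Int) (i : Nat) (hi : 1 ≤ i)
    (_hl : i ≤ l.length) (_hb : i ≤ b.length) :
    bInner l b s i = (segS l i (min i 256), segM b i (min i 256),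
      some (bst l b s i (min i 256 - 1)).1, (bst l b s i (min i 256 - 1)).2) := by
  unfold bInner
  have key : ∀ m, 1 ≤ m → m ≤ min i 256 →
      (List.range' 1 m).foldl
        (fun (q : Int × Int × Option Int × Int) (k : Nat) =>
          let seg_sum := q.1 + l.getD (i-k) 0
          let seg_max := if b.getD (i-k) 0 > q.2.1 then b.getD (i-k) 0 else q.2.1
          let cand := s.getD (i-k) 0 + seg_sum * seg_max + 11
          match q.2.2.1 with
          | none => (seg_sum, seg_max, some cand, (k : Int))
          | some bv =>
              if cand < bv then (seg_sum, seg_max, some cand, (k : Int))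
              else (seg_sum, seg_max, some bv, q.2.2.2))
        (0, b.getD (i-1) 0, none, 0)
      = (segS l i m, segM b i m, some (bst l b s i (m-1)).1, (bst l b s i (m-1)).2) := by
    intro m
    induction m with
    | zero => omega
    | succ m ih =>
        intro _ hm
        rcases Nat.eq_zero_or_pos m with h0 | hpos
        · subst h0
          show (List.range' 1 1).foldl _ _ = _
          simp only [List.range'_one, List.foldl_cons, List.foldl_nil]
          have h1 : (if b.getD (i-1) 0 > b.getD (i-1) 0 then b.getD (i-1) 0 else b.getD (i-1) 0)
              = segM b i 1 := by
            simp [segM]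
          simp only [gt_iff_lt, lt_self_iff_false, if_false]
          have hS : (0 : Int) + l.getD (i-1) 0 = segS l i 1 := by simp [segS]
          have hM : segM b i 1 = b.getD (i-1) 0 := by simp [segM]
          rw [hS, ← hM]
          show (segS l i 1, segM b i 1,
                some (s.getD (i-1) 0 + segS l i 1 * segM b i 1 + 11), (1 : Int)) = _
          simp [bst, candF]
        · rw [List.range'_concat, List.foldl_append, ih hpos (by omega)]
          simp only [one_mul, List.foldl_cons, List.foldl_nil]
          obtain ⟨j, rfl⟩ : ∃ j, m = j + 1 := ⟨m - 1, by omega⟩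
          have e1 : i - (1 + (j+1)) = i - (j+2) := by omega
          have e2 : segS l i (j+1) + l.getD (i-(j+2)) 0 = segS l i (j+2) := by
            simp [segS]; ring
          have e3 : (if b.getD (i-(j+2)) 0 > segM b i (j+1) then b.getD (i-(j+2)) 0
                     else segM b i (j+1)) = segM b i (j+2) := by
            show _ = max (b.getD (i-(j+2)) 0) (segM b i (j+1))
            rw [max_def]
            split_ifs <;> omega
          simp only [e1, e2, e3]
          show (if s.getD (i-(j+2)) 0 + segS l i (j+2) * segM b i (j+2) + 11
                   < (bst l b s i (j+1-1)).1
                then (segS l i (j+2), segM b i (j+2),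
                      some (s.getD (i-(j+2)) 0 + segS l i (j+2) * segM b i (j+2) + 11),
                      ((1 + (j+1) : Nat) : Int))
                else (segS l i (j+2), segM b i (j+2),
                      some (bst l b s i (j+1-1)).1, (bst l b s i (j+1-1)).2)) = _
          rw [show j + 1 - 1 = j by omega, show j + 1 + 1 - 1 = j + 1 by omega,
              show ((1 + (j+1) : Nat) : Int) = (j : Int) + 2 by omega]
          show _ = (_, _, some (bst l b s i (j+1)).1, (bst l b s i (j+1)).2)
          rw [show bst l b s i (j+1) = if candF l b s i (j+2) < (bst l b s i j).1
                then (candF l b s i (j+2), (j : Int)+2) else bst l b s i j from rfl]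
          unfold candF
          split_ifs <;> simp
  exact key (min i 256) (by omega) (by omega)

theorem step_eq (l b : List Int) (hpre : l.length ≤ b.length) (i : Nat)
    (hi : 1 ≤ i) (hn : i ≤ l.length) :
    ∀ st : List Int × List Int,
      (let r := aInner l b st.1 i; (st.1.set i r.1, st.2.set i r.2))
      = (let r := bInner l b st.1 i; (st.1.set i (r.2.2.1.getD 0), st.2.set i r.2.2.2)) := by
  intro st
  rw [aInner_eq l b st.1 i hi hn (le_trans hn hpre),
      bInner_eq l b st.1 i hi hn (le_trans hn hpre)]
  rfl

-- ===== VERDICT (by name: the statement is the Claim_ definition above) =====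
theorem dynamic_programming_compression_spec : Claim_equal_dynamic_programming_compression := by
  intro l b _ hpre
  unfold Spec_dynamic_programming_compression
  unfold dynamic_programming_compression dynamic_programming_compression_alt
  refine PySem.List.foldl_congr_mem _ _ _ _ ?_
  intro st i hi
  rw [List.mem_range'] at hi
  obtain ⟨j, hj, rfl⟩ := hi
  exact step_eq l b hpre (1 + 1 * j) (by omega) (by omega) st
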